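-- pv_equiv track=rewrite | github.com/andrewsipe/Filename_Tools | FontFiles_Cleaner.py | _has_duplicate_words
-- ===== SOURCE A (Python) =====
-- import unicodedata
-- from typing import List, Set, Tuple, Dict, Optional
--
-- def _tokenize(text: str) -> List[str]:
--     """Split text into alpha and non-alpha segments, preserving delimiters."""
--     if not text:
--         return []
--
--     parts = []
--     buf = []
--     is_alpha_prev = text[0].isalpha()
--
--     for ch in text:
--         is_alpha = ch.isalpha()
--         if is_alpha == is_alpha_prev:
--             buf.append(ch)
--         else:
--             parts.append("".join(buf))
--             buf = [ch]
--             is_alpha_prev = is_alpha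
--
--     if buf:
--         parts.append("".join(buf))
--
--     return parts
--
-- def _is_alpha_part(text: str) -> bool:
--     """Check if text segment is a word."""
--     return bool(text) and any(ch.isalpha() for ch in text)
--
-- def _normalize_for_compare(token: str) -> str:
--     """Normalize for case-insensitive comparison."""
--     try:
--         return unicodedata.normalize("NFC", token).casefold()
--     except Exception:
--         return token.lower()
--
-- def _has_duplicate_words(stem: str) -> bool:
--     """Check for duplicate words in stem."""
--     tokens = _tokenize(stem)
--     seen = set()
--
--     for token in tokens:
--         if _is_alpha_part(token):
--             key = _normalize_for_compare(token)
--             if key in seen: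
--                 return True
--             seen.add(key)
--
--     return False
-- ===== SOURCE B (Python) =====
-- import unicodedata
--
-- def _norm(w):
--     """Normalize for case-insensitive comparison."""
--     try:
--         return unicodedata.normalize("NFC", w).casefold()
--     except Exception:
--         return w.lower()
--
-- def _has_duplicate_words(stem: str) -> bool:
--     """Check for duplicate words in stem: one fused pass, no token list."""
--     seen = set()
--     buf = []
--     for ch in stem:
--         if ch.isalpha():
--             buf.append(ch)
--         elif buf:
--             key = _norm("".join(buf))
--             buf = []
--             if key in seen:
--                 return True
--             seen.add(key)
--     if buf:
--         key = _norm("".join(buf))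
--         if key in seen:
--             return True
--     return False
-- ===== Notes on version B (the rewrite author's own statement) =====
-- stated objective: simpler
-- what changed: Replaces the two-phase design (a _tokenize pass building a full list of alpha/non-alpha segments, then a filtering scan over that list) with one fused character pass that grows a word buffer and flushes it against the seen-set at each non-alpha boundary, never materialising tokens or non-alpha segments.
import Mathlib
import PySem

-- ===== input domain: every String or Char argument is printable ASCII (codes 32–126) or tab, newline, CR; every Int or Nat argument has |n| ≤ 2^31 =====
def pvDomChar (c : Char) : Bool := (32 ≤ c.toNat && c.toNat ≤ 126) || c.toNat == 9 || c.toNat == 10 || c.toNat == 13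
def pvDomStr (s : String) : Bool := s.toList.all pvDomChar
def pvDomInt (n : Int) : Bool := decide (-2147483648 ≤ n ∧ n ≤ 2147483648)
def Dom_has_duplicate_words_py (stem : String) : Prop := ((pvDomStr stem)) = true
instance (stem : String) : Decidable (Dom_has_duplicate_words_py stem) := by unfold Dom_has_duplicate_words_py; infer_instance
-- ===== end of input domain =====

-- B fuses A's two-phase tokenize-then-scan into one character pass (objective: simpler).

-- ===== PORT A =====
-- _tokenize's loop state: (parts, buf, is_alpha_prev)
def tokStep (st : List String × List Char × Bool) (ch : Char) : List String × List Char × Bool :=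
  if PySem.Chars.isalpha ch == st.2.2 then (st.1, st.2.1 ++ [ch], st.2.2)
  else (st.1 ++ [String.ofList st.2.1], [ch], PySem.Chars.isalpha ch)

def tokFinish (st : List String × List Char × Bool) : List String :=
  if st.2.1.isEmpty then st.1 else st.1 ++ [String.ofList st.2.1]

def tokenize_chars (cs : List Char) : List String :=
  match cs with
  | [] => []
  | c0 :: _ => tokFinish (cs.foldl tokStep ([], [], PySem.Chars.isalpha c0))

def tokenize_py (text : String) : List String := tokenize_chars text.toList

def is_alpha_part_py (t : String) : Bool :=
  !t.toList.isEmpty && t.toList.any PySem.Chars.isalpha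

-- unicodedata.normalize("NFC", ·) is the identity and casefold = lower on the ASCII domain
def normalize_for_compare_py (t : String) : String := PySem.Str.lower t

def aLoop : List String → PySem.Set String → Bool
  | [], _ => false
  | t :: ts, seen =>
    if is_alpha_part_py t then
      let key := normalize_for_compare_py t
      if PySem.Set.contains seen key then true
      else aLoop ts (PySem.Set.add seen key)
    else aLoop ts seen

def has_duplicate_words_py (stem : String) : Bool :=
  aLoop (tokenize_py stem) PySem.Set.empty

-- ===== PORT B =====
-- B's _norm helper (identical normalization; exact as lower on the ASCII domain)
def norm_alt (w : String) : String := PySem.Str.lower w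

def altGo : List Char → List Char → PySem.Set String → Bool
  | [], buf, seen =>
    if buf.isEmpty then false
    else
      let key := norm_alt (String.ofList buf)
      if PySem.Set.contains seen key then true else false
  | c :: cs, buf, seen =>
    if PySem.Chars.isalpha c then altGo cs (buf ++ [c]) seen
    else if buf.isEmpty then altGo cs buf seen
    else
      let key := norm_alt (String.ofList buf)
      if PySem.Set.contains seen key then true
      else altGo cs [] (PySem.Set.add seen key)

def has_duplicate_words_py_alt (stem : String) : Bool :=
  altGo stem.toList [] PySem.Set.empty

-- ===== PRECONDITION & SPEC =====
def Spec_has_duplicate_words_py (stem : String) (out : Bool) : Prop := out = has_duplicate_words_py_alt stem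
instance (stem : String) (out : Bool) : Decidable (Spec_has_duplicate_words_py stem out) := by unfold Spec_has_duplicate_words_py; infer_instance

-- ===== CLAIM (what is proved, stated in full; the proofs are below) =====
def Claim_equal_has_duplicate_words_py : Prop := ∀ (stem : String), Dom_has_duplicate_words_py stem → Spec_has_duplicate_words_py stem (has_duplicate_words_py stem)

-- ===== LEMMAS AND PROOFS =====

-- maximal runs of equal isalpha-class, as char lists (recursive characterisation of _tokenize)
def tok2 : List Char → List (List Char)
  | [] => []
  | c :: cs =>
      (c :: cs.takeWhile (fun x => PySem.Chars.isalpha x == PySem.Chars.isalpha c)) ::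
      tok2 (cs.dropWhile (fun x => PySem.Chars.isalpha x == PySem.Chars.isalpha c))
termination_by cs => cs.length
decreasing_by
  have := List.length_dropWhile_le (fun x => PySem.Chars.isalpha x == PySem.Chars.isalpha c) cs
  simp; omega

-- the maximal alpha runs (the words), common spec of both programs
def alphaWords : List Char → List (List Char)
  | [] => []
  | c :: cs =>
      if PySem.Chars.isalpha c then
        (c :: cs.takeWhile PySem.Chars.isalpha) :: alphaWords (cs.dropWhile PySem.Chars.isalpha)
      else alphaWords cs
termination_by cs => cs.length
decreasing_by
  · have := List.length_dropWhile_le PySem.Chars.isalpha cs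
    simp; omega
  · simp

def scanWords : List (List Char) → PySem.Set String → Bool
  | [], _ => false
  | w :: ws, seen =>
    let key := PySem.Str.lower (String.ofList w)
    if PySem.Set.contains seen key then true
    else scanWords ws (PySem.Set.add seen key)

theorem tokFold_inv (cs : List Char) :
    ∀ (parts : List String) (buf : List Char) (prev : Bool), buf ≠ [] →
      tokFinish (cs.foldl tokStep (parts, buf, prev)) =
        parts ++ String.ofList (buf ++ cs.takeWhile (fun x => PySem.Chars.isalpha x == prev)) ::
          (tok2 (cs.dropWhile (fun x => PySem.Chars.isalpha x == prev))).map String.ofList := by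
  induction cs with
  | nil =>
    intro parts buf prev hbuf
    simp [tokFinish, tok2, hbuf]
  | cons ch cs ih =>
    intro parts buf prev hbuf
    by_cases h : PySem.Chars.isalpha ch = prev
    · have hstep : tokStep (parts, buf, prev) ch = (parts, buf ++ [ch], prev) := by
        simp [tokStep, h]
      simp only [List.foldl_cons, hstep, List.takeWhile_cons, List.dropWhile_cons, h]
      rw [ih parts (buf ++ [ch]) prev (by simp)]
      simp
    · have hstep : tokStep (parts, buf, prev) ch =
          (parts ++ [String.ofList buf], [ch], PySem.Chars.isalpha ch) := by
        simp [tokStep, h]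
      simp only [List.foldl_cons, hstep, List.takeWhile_cons, List.dropWhile_cons, h]
      rw [ih (parts ++ [String.ofList buf]) [ch] (PySem.Chars.isalpha ch) (by simp)]
      simp [tok2, h]

theorem tokenize_eq_tok2 (cs : List Char) :
    tokenize_chars cs = (tok2 cs).map String.ofList := by
  cases cs with
  | nil => simp [tokenize_chars, tok2]
  | cons c0 cs =>
    have hstep : tokStep ([], [], PySem.Chars.isalpha c0) c0 =
        ([], [c0], PySem.Chars.isalpha c0) := by simp [tokStep]
    simp only [tokenize_chars, List.foldl_cons, hstep]
    rw [tokFold_inv cs [] [c0] (PySem.Chars.isalpha c0) (by simp)]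
    simp [tok2]

theorem alphaWords_dropWhile_not (cs : List Char) :
    alphaWords (cs.dropWhile (fun x => !PySem.Chars.isalpha x)) = alphaWords cs := by
  induction cs with
  | nil => simp
  | cons c cs ih =>
    by_cases h : PySem.Chars.isalpha c
    · simp [h]
    · simp only [List.dropWhile_cons]
      simp only [h]
      simpa [alphaWords, h] using ih

theorem aLoop_tok2 (cs : List Char) :
    ∀ seen, aLoop ((tok2 cs).map String.ofList) seen = scanWords (alphaWords cs) seen := by
  induction cs using tok2.induct with
  | case1 => intro seen; simp [tok2, alphaWords, aLoop, scanWords]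
  | case2 c cs ih =>
    intro seen
    by_cases h : PySem.Chars.isalpha c
    · have hp : (fun x => PySem.Chars.isalpha x == PySem.Chars.isalpha c) = PySem.Chars.isalpha := by
        funext x; simp [h]
      have halpha : is_alpha_part_py (String.ofList (c :: cs.takeWhile PySem.Chars.isalpha)) = true := by
        simp [is_alpha_part_py, String.toList_ofList, h]
      rw [tok2]
      simp only [hp] at ih ⊢
      simp only [List.map_cons, aLoop, halpha, alphaWords, h, if_pos, scanWords]
      simp only [normalize_for_compare_py]
      split_ifs with hc
      · rfl
      · exact ih _
    · have hp : (fun x => PySem.Chars.isalpha x == PySem.Chars.isalpha c) =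
          (fun x => !PySem.Chars.isalpha x) := by
        funext x; simp [h]
      have hnon : is_alpha_part_py
          (String.ofList (c :: cs.takeWhile (fun x => !PySem.Chars.isalpha x))) = false := by
        simp only [is_alpha_part_py, String.toList_ofList, List.isEmpty_cons, Bool.not_false,
          Bool.true_and, List.any_cons, h, Bool.false_or]
        rw [List.any_eq_false]
        intro x hx
        simpa using List.mem_takeWhile_imp hx
      rw [tok2]
      simp only [hp] at ih ⊢
      simp only [List.map_cons, aLoop, hnon, Bool.false_eq_true, ite_false]
      rw [ih seen, alphaWords_dropWhile_not]
      simp [alphaWords, h]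

theorem altGo_spec (cs : List Char) :
    (∀ seen, altGo cs [] seen = scanWords (alphaWords cs) seen) ∧
    (∀ buf seen, buf ≠ [] →
      altGo cs buf seen =
        scanWords ((buf ++ cs.takeWhile PySem.Chars.isalpha) ::
          alphaWords (cs.dropWhile PySem.Chars.isalpha)) seen) := by
  induction cs with
  | nil =>
    constructor
    · intro seen; simp [altGo, alphaWords, scanWords]
    · intro buf seen hbuf
      have hne : buf.isEmpty = false := by simpa [List.isEmpty_iff] using hbuf
      simp only [altGo, hne, Bool.false_eq_true, ite_false, scanWords, alphaWords,
        List.takeWhile_nil, List.dropWhile_nil, List.append_nil, norm_alt]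
      split_ifs <;> simp
  | cons c cs ih =>
    obtain ⟨ih1, ih2⟩ := ih
    constructor
    · intro seen
      by_cases h : PySem.Chars.isalpha c
      · simp only [altGo, h, if_pos, List.nil_append]
        have := ih2 [c] seen (by simp)
        rw [this]
        simp [alphaWords, h]
      · simp only [altGo, h, Bool.false_eq_true, ite_false, List.isEmpty_nil, if_pos]
        rw [ih1 seen]
        simp [alphaWords, h]
    · intro buf seen hbuf
      have hne : buf.isEmpty = false := by simpa [List.isEmpty_iff] using hbuf
      by_cases h : PySem.Chars.isalpha c
      · simp only [altGo, h, if_pos]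
        rw [ih2 (buf ++ [c]) seen (by simp)]
        simp [h, List.append_assoc]
      · simp only [altGo, h, Bool.false_eq_true, ite_false, hne]
        simp only [List.takeWhile_cons, List.dropWhile_cons, h, Bool.false_eq_true,
          ite_false, List.append_nil]
        simp only [scanWords, norm_alt]
        have halw : alphaWords (c :: cs) = alphaWords cs := by simp [alphaWords, h]
        rw [halw]
        split_ifs with hc
        · rfl
        · exact ih1 _

-- ===== VERDICT (by name: the statement is the Claim_ definition above) =====
theorem has_duplicate_words_py_spec : Claim_equal_has_duplicate_words_py := by
  intro stem _
  unfold Spec_has_duplicate_words_py has_duplicate_words_py has_duplicate_words_py_alt tokenize_py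
  rw [tokenize_eq_tok2, aLoop_tok2, (altGo_spec stem.toList).1]
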